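-- pv_equiv track=rewrite | github.com/agrawal-khushboo/ECE-143 | word_process.py | get_most_common_start
-- ===== SOURCE A (Python) =====
-- def get_most_common_start(words):
--     """
--     def most common starting letter
--     """
--     dic={}
--     assert type(words)==list
--     assert len(words)>0
--     for w in words:
--         assert type(w)==str
--         dic[w[0]]=0
--     for w in words:
--         dic[w[0]]+=1
--     word=sorted(dic.items(), key=lambda item: item[1],reverse=True)
--     letter=word[0][0]
--     return letter
-- ===== SOURCE B (Python) =====
-- def get_most_common_start(words):
--     """
--     most common starting letter: no counting dict -- collect first letters into
--     a list, then pick max over the ordered-dedup of candidates keyed by list.count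
--     (max keeps the first maximal candidate, matching A's stable descending sort)
--     """
--     assert type(words)==list
--     assert len(words)>0
--     letters=[]
--     for w in words:
--         assert type(w)==str
--         letters.append(w[0])
--     return max(dict.fromkeys(letters), key=letters.count)
-- ===== Notes on version B (the rewrite author's own statement) =====
-- stated objective: alternative
-- what changed: Drops the counting dict and the sort entirely: B collects the first letters into a plain list and picks max over the ordered dedup of candidates keyed by list.count (max's first-maximum rule reproduces the stable descending sort's first-appearance tie-break).
import Mathlib
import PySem

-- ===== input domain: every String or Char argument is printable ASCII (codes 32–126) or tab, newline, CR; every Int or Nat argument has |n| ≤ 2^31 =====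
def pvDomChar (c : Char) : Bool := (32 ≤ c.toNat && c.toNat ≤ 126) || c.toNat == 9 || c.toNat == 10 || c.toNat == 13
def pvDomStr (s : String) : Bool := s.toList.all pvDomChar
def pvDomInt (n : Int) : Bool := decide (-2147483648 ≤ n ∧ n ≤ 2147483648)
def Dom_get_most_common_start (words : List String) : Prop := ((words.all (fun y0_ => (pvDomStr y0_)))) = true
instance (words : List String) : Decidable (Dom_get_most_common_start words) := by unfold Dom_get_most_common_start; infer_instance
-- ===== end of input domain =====

-- B drops A's dict and descending sort: it collects the first letters into a plain list and selects a running champion by comparing list.count values (alternative decomposition, not faster).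


-- shared helper: w[0] as a Char (total form; Pre_ guarantees w ≠ "")
def pvFirst (w : String) : Char := PySem.List.pyGetD w.toList 0 ' '

-- ===== PORT A =====
def get_most_common_start (words : List String) : String :=
  let dic0 : PySem.Dict Char Int :=
    words.foldl (fun d w => d.insert (pvFirst w) 0) PySem.Dict.empty
  let dic : PySem.Dict Char Int :=
    words.foldl (fun d w => d.modify (pvFirst w) 0 (· + 1)) dic0
  let word := PySem.List.sorted dic.items (fun it => it.2) true
  let letter := (PySem.List.pyGetD word 0 (' ', 0)).1
  String.ofList [letter]

-- ===== PORT B =====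
def get_most_common_start_alt (words : List String) : String :=
  let letters : List Char := words.foldl (fun acc w => acc ++ [pvFirst w]) []
  match PySem.List.max? (PySem.List.dedup letters) (fun c => PySem.List.count letters c) with
  | some best => String.ofList [best]
  | none => ""   -- unreachable: letters is nonempty under Pre_ (Python's max would raise only there)

-- ===== PRECONDITION & SPEC =====
-- Pre_ excludes exactly the inputs where A raises: the empty list (AssertionError)
-- and lists containing an empty string (IndexError on w[0]).
def Pre_get_most_common_start (words : List String) : Prop :=
  words ≠ [] ∧ ∀ w ∈ words, w.toList ≠ []
instance (words : List String) : Decidable (Pre_get_most_common_start words) := by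
  unfold Pre_get_most_common_start; infer_instance
def pvWitness_get_most_common_start : List String := ["apple", "ant", "bee"]
def Spec_get_most_common_start (words : List String) (out : String) : Prop := out = get_most_common_start_alt words
instance (words : List String) (out : String) : Decidable (Spec_get_most_common_start words out) := by unfold Spec_get_most_common_start; infer_instance

-- ===== CLAIM (what is proved, stated in full; the proofs are below) =====
def Claim_equal_get_most_common_start : Prop := ∀ (words : List String), Dom_get_most_common_start words → Pre_get_most_common_start words → Spec_get_most_common_start words (get_most_common_start words)

-- ===== LEMMAS AND PROOFS =====

-- A's first loop only ever stores 0, so every lookup with default 0 yields 0.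
theorem pv_getD_zeros {κ : Type} [BEq κ] [LawfulBEq κ] [DecidableEq κ] (l : List κ) (d : PySem.Dict κ Int)
    (h : ∀ v, d.getD v 0 = 0) (v : κ) :
    (l.foldl (fun d k => d.insert k (0 : Int)) d).getD v 0 = 0 := by
  induction l generalizing d with
  | nil => simpa using h v
  | cons k t ih =>
      simp only [List.foldl_cons]
      exact ih _ (fun v => by rw [PySem.Dict.getD_insert]; split <;> simp [h])

-- s.update xs = s when every element of xs is already in s
theorem pv_update_of_subset {α : Type} [BEq α] [LawfulBEq α] (s : PySem.Set α) (xs : List α)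
    (h : ∀ x ∈ xs, x ∈ s) : PySem.Set.update s xs = s := by
  have hfil : List.filter (fun y => !s.contains y) (PySem.Set.ofList xs) = [] :=
    List.filter_eq_nil_iff.mpr (fun a ha => by
      simp [h a ((PySem.Set.mem_ofList xs a).mp ha)])
  rw [PySem.Set.update_eq_append_filter, hfil, List.append_nil]

-- head of insertBy with the reverse comparator = one first-maximum fold step
theorem pv_head_insertBy {α κ : Type} [LinearOrder κ] (key : α → κ) (x : α) (acc : List α) :
    (PySem.List.insertBy (fun a b => decide (key b < key a)) x acc).head? =
      (match acc.head? with
        | none => some x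
        | some m => if key m < key x then some x else some m) := by
  cases acc with
  | nil => simp [PySem.List.insertBy]
  | cons m s =>
      simp only [PySem.List.insertBy, List.head?_cons]
      split <;> rename_i hh
      · simp_all
      · simp_all

-- head of the reverse insertion sort = Python's max (first maximal element)
theorem pv_head_sorted_rev {α κ : Type} [LinearOrder κ] (L : List α) (key : α → κ) :
    (PySem.List.sorted L key true).head? = PySem.List.max? L key := by
  rw [PySem.List.sorted_rev_eq_foldl_insertBy]
  show _ = List.foldl _ none L
  have main : ∀ (L : List α) (acc : List α),
      (L.foldl (fun acc x => PySem.List.insertBy (fun a b => decide (key b < key a)) x acc) acc).head? =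
      L.foldl (fun o x => match o with
        | none => some x
        | some m => if key m < key x then some x else some m) acc.head? := by
    intro L
    induction L with
    | nil => intro acc; rfl
    | cons x t ih =>
        intro acc
        simp only [List.foldl_cons]
        rw [ih, pv_head_insertBy]
  simpa using main L []

-- A's dict holds the first letters in first-appearance order with their counts
theorem pv_itemsA (words : List String) :
    (words.foldl (fun d w => d.modify (pvFirst w) 0 (· + 1))
      (words.foldl (fun d w => d.insert (pvFirst w) (0 : Int)) PySem.Dict.empty)).items =
    (PySem.Set.ofList (words.map pvFirst)).map
      (fun k => (k, ((words.map pvFirst).count k : Int))) := by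
  set ks := words.map pvFirst with hks
  set dz := words.foldl (fun d w => d.insert (pvFirst w) (0 : Int)) PySem.Dict.empty with hdz
  set dA := words.foldl (fun d w => d.modify (pvFirst w) 0 (· + 1)) dz with hdA
  have hzKeys : dz.keys = PySem.Set.ofList ks := by
    rw [hdz, PySem.Dict.keys_foldl_insert_key words pvFirst (fun _ _ => (0 : Int))]
    simp [PySem.Set.update_nil_left, PySem.Dict.keys_empty, hks]
  have hzNodup : dz.keys.Nodup := by
    rw [hdz]; exact PySem.Dict.nodup_keys_foldl_insert_key _ _ _ _ PySem.Dict.nodup_keys_empty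
  have hANodup : dA.keys.Nodup := by
    rw [hdA]; exact PySem.Dict.nodup_keys_foldl_modify_key _ _ _ _ _ hzNodup
  have hAKeys : dA.keys = PySem.Set.ofList ks := by
    rw [hdA, PySem.Dict.keys_foldl_modify_key words pvFirst 0 (fun _ _ => (· + 1)) dz, hzKeys]
    exact pv_update_of_subset _ _ (fun x hx => by
      rw [PySem.Set.mem_ofList]; exact hx)
  have hzGet : ∀ v, dz.getD v 0 = 0 := by
    intro v
    rw [hdz, ← List.foldl_map (f := pvFirst) (g := fun (d : PySem.Dict Char Int) k => d.insert k (0 : Int))]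
    exact pv_getD_zeros ks PySem.Dict.empty (fun v => by simp [PySem.Dict.getD_empty]) v
  have hAGet : ∀ v, dA.getD v 0 = (ks.count v : Int) := by
    intro v
    rw [hdA, ← List.foldl_map (f := pvFirst) (g := fun (d : PySem.Dict Char Int) k => d.modify k 0 (· + 1))]
    rw [PySem.Dict.getD_foldl_modify_add_one ks dz v, hzGet]
    ring
  rw [PySem.Dict.items_eq_map_keys dA hANodup 0, hAKeys]
  exact List.map_congr_left (fun k _ => by rw [hAGet])

-- max over a mapped list = map of max with the composed key
theorem pv_max?_map {α β κ : Type} [LinearOrder κ] (f : α → β) (L : List α) (key : β → κ) :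
    PySem.List.max? (L.map f) key = Option.map f (PySem.List.max? L (fun x => key (f x))) := by
  show List.foldl _ none (L.map f) = Option.map f (List.foldl _ none L)
  rw [List.foldl_map]
  have main : ∀ (L : List α) (acc : Option α),
      L.foldl (fun acc x => match acc with
        | none => some (f x)
        | some m => if key m < key (f x) then some (f x) else some m) (Option.map f acc) =
      Option.map f (L.foldl (fun acc x => match acc with
        | none => some x
        | some m => if key (f m) < key (f x) then some x else some m) acc) := by
    intro L
    induction L with
    | nil => intro acc; rfl
    | cons x t ih =>
        intro acc
        simp only [List.foldl_cons]
        cases acc with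
        | none => exact ih (some x)
        | some m =>
            simp only [Option.map_some]
            split
            · exact ih (some x)
            · exact ih (some m)
  simpa using main L none
-- a Nat-valued key may be read through the Int cast
theorem pv_max?_cast {α : Type} (L : List α) (f : α → ℕ) :
    PySem.List.max? L (fun x => (f x : Int)) = PySem.List.max? L f := by
  show List.foldl _ none L = List.foldl _ none L
  congr 1; funext acc x
  cases acc with
  | none => rfl
  | some m => simp [Nat.cast_lt]

-- Python's max over set(xs) = max over xs (first maximal element survives dedup)
theorem pv_max?_ofList {α κ : Type} [DecidableEq α] [LinearOrder κ] (xs : List α) (key : α → κ) :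
    PySem.List.max? (PySem.Set.ofList xs) key = PySem.List.max? xs key := by
  have step_add : ∀ (s : PySem.Set α) (x : α),
      PySem.List.max? (PySem.Set.add s x) key =
        (match PySem.List.max? s key with
          | none => some x
          | some m => if key m < key x then some x else some m) := by
    intro s x
    by_cases hx : s.contains x
    · rw [PySem.Set.add, if_pos hx]
      obtain ⟨m, hm⟩ : ∃ m, PySem.List.max? s key = some m := by
        cases hms : PySem.List.max? s key with
        | none =>
            have := (PySem.List.max?_eq_none_iff (xs := s) (key := key)).mp hms
            simp [PySem.Set.contains, this] at hx
        | some m => exact ⟨m, rfl⟩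
      have hle : key x ≤ key m :=
        PySem.List.max?_isMax hm x (by simpa [PySem.Set.contains] using hx)
      rw [hm]; simp [not_lt.mpr hle]
    · rw [PySem.Set.add, if_neg hx]
      show List.foldl _ none (s ++ [x]) = _
      rw [List.foldl_append]
      rfl
  have main : ∀ (l : List α) (s : PySem.Set α),
      PySem.List.max? (l.foldl PySem.Set.add s) key =
        List.foldl (fun acc x => match acc with
          | none => some x
          | some m => if key m < key x then some x else some m) (PySem.List.max? s key) l := by
    intro l
    induction l with
    | nil => intro s; rfl
    | cons x t ih =>
        intro s
        simp only [List.foldl_cons]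
        rw [ih (PySem.Set.add s x), step_add]
  rw [PySem.Set.ofList_eq_foldl, main xs []]
  rfl

-- ===== VERDICT (by name: the statement is the Claim_ definition above) =====
theorem get_most_common_start_spec : Claim_equal_get_most_common_start := by
  intro words _ hpre
  unfold Spec_get_most_common_start get_most_common_start get_most_common_start_alt
  simp only
  set ks := words.map pvFirst with hks
  -- B's letters list is exactly ks
  have hletters : words.foldl (fun acc w => acc ++ [pvFirst w]) [] = ks := by
    rw [PySem.List.foldl_append_singleton_eq_map]; simp [hks]
  rw [hletters]
  -- ks is nonempty
  have hkne : ks ≠ [] := by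
    rw [hks]; simpa [List.map_eq_nil_iff] using hpre.1
  -- A's side: head of the descending sort of the items = first maximal item
  rw [pv_itemsA words, ← hks]
  set cntN : Char → ℕ := fun k => ks.count k with hcnt
  set L := (PySem.Set.ofList ks).map (fun k => (k, (cntN k : Int))) with hL
  obtain ⟨m, hm⟩ : ∃ m, PySem.List.max? ks cntN = some m := by
    cases hmm : PySem.List.max? ks cntN with
    | none => exact absurd ((PySem.List.max?_eq_none_iff _ _).mp hmm) hkne
    | some m => exact ⟨m, rfl⟩
  have hmaxL : PySem.List.max? L (fun it => it.2) = some (m, (cntN m : Int)) := by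
    rw [hL, pv_max?_map, pv_max?_cast, pv_max?_ofList, hm]; rfl
  have hhead := pv_head_sorted_rev L (fun it => it.2)
  rw [hmaxL] at hhead
  -- B's side: max over the ordered dedup keyed by count returns m too
  have hB : PySem.List.max? (PySem.List.dedup ks) (fun c => PySem.List.count ks c) = some m := by
    have hkey : (fun c => PySem.List.count ks c) = cntN := by
      funext c; simp [PySem.List.count_eq, hcnt, List.count]
    rw [PySem.List.dedup_eq_ofList, hkey, pv_max?_ofList, hm]
  rw [hB]
  cases hs : PySem.List.sorted L (fun it => it.2) true with
  | nil => rw [hs] at hhead; simp at hhead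
  | cons p rest =>
      rw [hs] at hhead
      simp only [List.head?_cons, Option.some.injEq] at hhead
      rw [hhead, PySem.List.pyGetD_zero_cons]
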